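-- pv_equiv track=rewrite | github.com/cathoderay/codechef | contests/june-challenge-2021/SHROUTE.py | solve
-- ===== SOURCE A (Python) =====
-- from bisect import bisect_left
-- from math import inf
--
-- def find_min_dist(A, ones, twos, ones_set, twos_set, v):
--     if v == 0 or v in ones_set or v in twos_set: return 0
--
--     left = bisect_left(ones, v - 1)
--     if left == len(ones) or ones[left] >= v: left -= 1
--     if left == -1 or A[ones[left]] != 1 or ones[left] >= v: left = inf
--     else: left = ones[left]
--
--     right = bisect_left(twos, v + 1)
--     if right == len(twos): right = -1
--     if right == -1 or A[twos[right]] != 2 or twos[right] <= v: right = inf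
--     else: right = twos[right]
--
--     if left == right == inf: return -1
--     return min(abs(v - left), abs(right - v))
--
-- def solve(A, B):
--     ones = [i for i, v in enumerate(A) if v == 1]
--     twos = [i for i, v in enumerate(A) if v == 2]
--     ones_set = set(ones)
--     twos_set = set(twos)
--     params = [A, ones, twos, ones_set, twos_set]
--     solution = [str(find_min_dist(*params, b - 1)) for b in B]
--     return ' '.join(solution) + '\n'
-- ===== SOURCE B (Python) =====
-- def solve(A, B):
--     # Precompute, in two linear passes, L[k] = largest index < k holding a 1 (else -1)
--     # and R[k] = smallest index >= k holding a 2 (else n); each query is then O(1).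
--     n = len(A)
--     L = [-1] * (n + 1)
--     for i in range(n):
--         L[i + 1] = i if A[i] == 1 else L[i]
--     R = [n] * (n + 1)
--     for i in range(n - 1, -1, -1):
--         R[i] = i if A[i] == 2 else R[i + 1]
--     out = []
--     for b in B:
--         v = b - 1
--         if v == 0 or (0 <= v < n and (A[v] == 1 or A[v] == 2)):
--             out.append('0')
--             continue
--         lv = -1 if v <= 0 else L[v if v < n else n]
--         rv = n if v >= n - 1 else R[v + 1 if v + 1 > 0 else 0]
--         if lv == -1 and rv == n:
--             out.append('-1')
--         elif lv == -1:
--             out.append(str(rv - v))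
--         elif rv == n:
--             out.append(str(v - lv))
--         else:
--             out.append(str(min(v - lv, rv - v)))
--     return ' '.join(out) + '\n'
-- ===== Notes on version B (the rewrite author's own statement) =====
-- stated objective: faster
-- what changed: Replaces per-query binary searches over the lists of 1-indices/2-indices with two linearly precomputed arrays (nearest 1 strictly to the left, nearest 2 strictly to the right), answering each query in O(1).
import Mathlib
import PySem

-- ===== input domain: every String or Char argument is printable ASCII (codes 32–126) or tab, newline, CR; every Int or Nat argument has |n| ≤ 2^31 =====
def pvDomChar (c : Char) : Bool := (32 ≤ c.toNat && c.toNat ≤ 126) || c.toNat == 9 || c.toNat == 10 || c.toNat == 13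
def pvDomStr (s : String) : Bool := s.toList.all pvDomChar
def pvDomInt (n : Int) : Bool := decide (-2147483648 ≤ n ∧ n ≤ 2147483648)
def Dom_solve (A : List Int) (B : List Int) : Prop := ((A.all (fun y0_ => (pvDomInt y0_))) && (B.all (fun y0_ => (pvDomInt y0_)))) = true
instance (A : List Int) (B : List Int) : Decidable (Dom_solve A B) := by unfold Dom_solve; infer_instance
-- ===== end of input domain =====

-- B replaces A's per-query binary searches by two linearly precomputed
-- nearest-1-to-the-left / nearest-2-to-the-right arrays with O(1) queries.

-- ===== PORT A =====
-- Python's `inf` sentinel for "no station on this side" is modelled as `none`.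
-- `bisect_left` is the stdlib call, ported as PySem.List.bisectLeft.
def leftOf (A ones : List Int) (v : Int) : Option Int :=
  let left0 : Int := (PySem.List.bisectLeft ones (v - 1) : Int)
  let left1 : Int :=
    if left0 = (ones.length : Int) ∨ v ≤ (PySem.List.pyGet? ones left0).getD 0 then left0 - 1 else left0
  if left1 = -1 ∨ PySem.List.pyGetD A ((PySem.List.pyGet? ones left1).getD 0) 0 ≠ 1 ∨
      v ≤ (PySem.List.pyGet? ones left1).getD 0 then none
  else some ((PySem.List.pyGet? ones left1).getD 0)

def rightOf (A twos : List Int) (v : Int) : Option Int :=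
  let right0 : Int := (PySem.List.bisectLeft twos (v + 1) : Int)
  let right1 : Int := if right0 = (twos.length : Int) then -1 else right0
  if right1 = -1 ∨ PySem.List.pyGetD A ((PySem.List.pyGet? twos right1).getD 0) 0 ≠ 2 ∨
      (PySem.List.pyGet? twos right1).getD 0 ≤ v then none
  else some ((PySem.List.pyGet? twos right1).getD 0)

def findMinDist (A ones twos : List Int) (onesSet twosSet : PySem.Set Int) (v : Int) : Int :=
  if v = 0 ∨ PySem.Set.contains onesSet v ∨ PySem.Set.contains twosSet v then 0
  else
    match leftOf A ones v, rightOf A twos v with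
    | none, none => -1
    | some l, none => |v - l|
    | none, some r => |r - v|
    | some l, some r => min |v - l| |r - v|

def solve (A : List Int) (B : List Int) : String :=
  let ones := ((PySem.List.enumerate A).filter (fun p => p.2 == 1)).map (fun p => p.1)
  let twos := ((PySem.List.enumerate A).filter (fun p => p.2 == 2)).map (fun p => p.1)
  let onesSet := PySem.Set.ofList ones
  let twosSet := PySem.Set.ofList twos
  let solution := B.map (fun b => PySem.Int.toStr (findMinDist A ones twos onesSet twosSet (b - 1)))
  PySem.Str.join " " solution ++ "\n"

-- ===== PORT B =====
-- goL builds L[1..n] (L[k] = nearest 1-index left of k, else -1): the forward fill loop.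
def goL : List Int → Int → Int → List Int
  | [], _, _ => []
  | a :: rest, i, last =>
    let cur := if a = 1 then i else last
    cur :: goL rest (i + 1) cur

-- goR builds R[0..n] (R[k] = nearest 2-index at/after k, else n): the backward fill loop
-- written as recursion from the right; R[i+1] (always present) is the head of the tail.
def goR : List Int → Int → List Int
  | [], i => [i]
  | a :: rest, i =>
    let r := goR rest (i + 1)
    (if a = 2 then i else r.headD 0) :: r

def queryB (A : List Int) (n : Int) (L R : List Int) (v : Int) : Int :=
  if v = 0 ∨ (0 ≤ v ∧ v < n ∧ (PySem.List.pyGetD A v 0 = 1 ∨ PySem.List.pyGetD A v 0 = 2)) then 0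
  else
    let lv := if v ≤ 0 then -1 else PySem.List.pyGetD L (if v < n then v else n) 0
    let rv := if n - 1 ≤ v then n else PySem.List.pyGetD R (if 0 < v + 1 then v + 1 else 0) 0
    if lv = -1 ∧ rv = n then -1
    else if lv = -1 then rv - v
    else if rv = n then v - lv
    else min (v - lv) (rv - v)

def solve_alt (A : List Int) (B : List Int) : String :=
  let n : Int := (A.length : Int)
  let L := -1 :: goL A 0 (-1)
  let R := goR A 0
  PySem.Str.join " " (B.map (fun b => PySem.Int.toStr (queryB A n L R (b - 1)))) ++ "\n"

-- ===== PRECONDITION & SPEC =====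
def Spec_solve (A : List Int) (B : List Int) (out : String) : Prop := out = solve_alt A B
instance (A : List Int) (B : List Int) (out : String) : Decidable (Spec_solve A B out) := by unfold Spec_solve; infer_instance

-- ===== CLAIM (what is proved, stated in full; the proofs are below) =====
def Claim_equal_solve : Prop := ∀ (A : List Int) (B : List Int), Dom_solve A B → Spec_solve A B (solve A B)

-- ===== LEMMAS AND PROOFS =====

-- proof-side view: the (sorted) list of indices of `A` holding value `t`, offset `i`
def idxs (t : Int) : List Int → Int → List Int
  | [], _ => []
  | a :: rest, i => if a = t then i :: idxs t rest (i + 1) else idxs t rest (i + 1)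

theorem idxs_eq_enum (t : Int) (A : List Int) (s : Int) :
    ((PySem.List.enumerate A s).filter (fun p => p.2 == t)).map (fun p => p.1) = idxs t A s := by
  induction A generalizing s with
  | nil => simp [idxs, PySem.List.enumerate_nil]
  | cons a rest ih =>
    rw [PySem.List.enumerate_cons]
    by_cases h : a = t <;> simp [idxs, h, ih]

theorem mem_idxs (t : Int) (A : List Int) (i x : Int) :
    x ∈ idxs t A i ↔ i ≤ x ∧ x < i + (A.length : Int) ∧ A[(x - i).toNat]? = some t := by
  induction A generalizing i with
  | nil => simp [idxs]
  | cons a rest ih =>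
    simp only [List.length_cons]
    constructor
    · intro hx
      have hx' : (a = t ∧ x = i) ∨ x ∈ idxs t rest (i + 1) := by
        by_cases h : a = t <;> simp [idxs, h] at hx <;> tauto
      rcases hx' with ⟨rfl, rfl⟩ | hx'
      · refine ⟨le_refl _, by push_cast; omega, by simp⟩
      · rcases (ih (i + 1)).mp hx' with ⟨h1, h2, h3⟩
        refine ⟨by omega, by push_cast at h2 ⊢; omega, ?_⟩
        have hxi : (x - i).toNat = (x - (i + 1)).toNat + 1 := by omega
        rw [hxi]; simpa using h3
    · rintro ⟨h1, h2, h3⟩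
      by_cases hxi : x = i
      · subst hxi
        simp at h3
        simp [idxs, h3]
      · have hxi' : (x - i).toNat = (x - (i + 1)).toNat + 1 := by omega
        rw [hxi'] at h3; simp at h3
        have hmem : x ∈ idxs t rest (i + 1) :=
          (ih (i + 1)).mpr ⟨by omega, by push_cast at h2 ⊢; omega, h3⟩
        by_cases h : a = t <;> simp [idxs, h, hmem]

theorem idxs_ge (t : Int) (A : List Int) (i : Int) : ∀ x ∈ idxs t A i, i ≤ x := by
  intro x hx; exact ((mem_idxs t A i x).mp hx).1

theorem pairwise_idxs (t : Int) (A : List Int) (i : Int) : (idxs t A i).Pairwise (· < ·) := by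
  induction A generalizing i with
  | nil => simp [idxs]
  | cons a rest ih =>
    by_cases h : a = t <;> simp [idxs, h]
    · exact ⟨fun x hx => by have := idxs_ge t rest (i + 1) x hx; omega, ih (i + 1)⟩
    · exact ih (i + 1)

theorem filter_lt_eq_take (l : List Int) (v : Int) (m : Nat) (hm : m ≤ l.length)
    (h1 : ∀ (j : Nat) (hj : j < l.length), j < m → l[j] < v)
    (h2 : ∀ (j : Nat) (hj : j < l.length), m ≤ j → v ≤ l[j]) :
    l.filter (fun x => decide (x < v)) = l.take m := by
  induction l generalizing m with
  | nil => simp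
  | cons a xs ih =>
    match m with
    | 0 =>
      simp only [List.take_zero]
      rw [List.filter_eq_nil_iff]
      intro x hx
      obtain ⟨j, hj, rfl⟩ := List.mem_iff_getElem.mp hx
      simpa using not_lt.mpr (h2 j hj (Nat.zero_le j))
    | k + 1 =>
      have ha : a < v := by simpa using h1 0 (by simp) (Nat.succ_pos k)
      rw [List.take_succ_cons, List.filter_cons_of_pos (by simpa using ha)]
      congr 1
      exact ih k (by simpa using hm)
        (fun j hj hjk => by simpa using h1 (j + 1) (by simpa using hj) (by omega))
        (fun j hj hjk => by simpa using h2 (j + 1) (by simpa using hj) (by omega))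

theorem filter_gt_eq_drop (l : List Int) (v : Int) (m : Nat) (hm : m ≤ l.length)
    (h1 : ∀ (j : Nat) (hj : j < l.length), j < m → l[j] ≤ v)
    (h2 : ∀ (j : Nat) (hj : j < l.length), m ≤ j → v < l[j]) :
    l.filter (fun x => decide (v < x)) = l.drop m := by
  induction l generalizing m with
  | nil => simp
  | cons a xs ih =>
    match m with
    | 0 =>
      simp only [List.drop_zero]
      rw [List.filter_eq_self]
      intro x hx
      obtain ⟨j, hj, rfl⟩ := List.mem_iff_getElem.mp hx
      simpa using h2 j hj (Nat.zero_le j)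
    | k + 1 =>
      have ha : a ≤ v := by simpa using h1 0 (by simp) (Nat.succ_pos k)
      rw [List.drop_succ_cons, List.filter_cons_of_neg (by simpa using not_lt.mpr ha)]
      exact ih k (by simpa using hm)
        (fun j hj hjk => by simpa using h1 (j + 1) (by simpa using hj) (by omega))
        (fun j hj hjk => by simpa using h2 (j + 1) (by simpa using hj) (by omega))

theorem getLast?_take_eq (l : List Int) (m : Nat) (h0 : 0 < m) (hm : m ≤ l.length) :
    (l.take m).getLast? = some l[m - 1] := by
  rw [List.getLast?_eq_getElem?, List.length_take, Nat.min_eq_left hm, List.getElem?_take_of_lt (by omega)]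
  exact List.getElem?_eq_getElem (by omega)

theorem leftOf_char (A l : List Int) (v : Int) (hs : l.Pairwise (· < ·))
    (h1 : ∀ x ∈ l, PySem.List.pyGetD A x 0 = 1) :
    leftOf A l v = (l.filter (fun x => decide (x < v))).getLast? := by
  have hmono := List.pairwise_iff_getElem.mp hs
  obtain ⟨hcle, hlt, hge⟩ := PySem.List.bisectLeft_spec l (v - 1) (hs.imp (fun h => le_of_lt h))
  set c := PySem.List.bisectLeft l (v - 1) with hcdef
  unfold leftOf
  rw [← hcdef]
  dsimp only []
  by_cases hcl : c = l.length
  · have hc1 : ((c : Int) = (l.length : Int) ∨ v ≤ (PySem.List.pyGet? l (c : Int)).getD 0) :=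
      Or.inl (by exact_mod_cast hcl)
    rw [if_pos hc1]
    by_cases hnil : l.length = 0
    · have hl : l = [] := List.length_eq_zero_iff.mp hnil
      have hc0 : c = 0 := by omega
      have hc2 : ((c : Int) - 1 = -1 ∨
          PySem.List.pyGetD A ((PySem.List.pyGet? l ((c : Int) - 1)).getD 0) 0 ≠ 1 ∨
          v ≤ (PySem.List.pyGet? l ((c : Int) - 1)).getD 0) := Or.inl (by rw [hc0]; norm_num)
      rw [if_pos hc2, hl]
      simp
    · have hlen : 0 < l.length := Nat.pos_of_ne_zero hnil
      have hcast : (c : Int) - 1 = ((l.length - 1 : Nat) : Int) := by omega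
      have hget : PySem.List.pyGet? l ((l.length - 1 : Nat) : Int) = some l[l.length - 1] := by
        rw [PySem.List.pyGet?_natCast]; exact List.getElem?_eq_getElem (by omega)
      rw [hcast, hget]
      simp only [Option.getD_some]
      have hlast : l[l.length - 1] < v - 1 := hlt _ (by omega) (by omega)
      rw [if_neg (by push Not; exact ⟨by omega, h1 _ (l.getElem_mem _), by omega⟩)]
      have hfil : l.filter (fun x => decide (x < v)) = l.take l.length :=
        filter_lt_eq_take l v l.length (le_refl _)
          (fun j hj _ => by have := hlt j hj (by omega); omega)
          (fun j hj h' => by omega)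
      rw [hfil, List.take_length, List.getLast?_eq_getElem?]
      exact (List.getElem?_eq_getElem (by omega)).symm
  · have hclt : c < l.length := lt_of_le_of_ne hcle hcl
    have hget : PySem.List.pyGet? l (c : Int) = some l[c] := by
      rw [PySem.List.pyGet?_natCast]; exact List.getElem?_eq_getElem hclt
    by_cases hv : v ≤ l[c]
    · have hc1 : ((c : Int) = (l.length : Int) ∨ v ≤ (PySem.List.pyGet? l (c : Int)).getD 0) :=
        Or.inr (by rw [hget]; simpa using hv)
      rw [if_pos hc1]
      have hm : l.filter (fun x => decide (x < v)) = l.take c :=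
        filter_lt_eq_take l v c (le_of_lt hclt)
          (fun j hj hjc => by have := hlt j hj hjc; omega)
          (fun j hj hjc => by
            rcases eq_or_lt_of_le hjc with rfl | hlt'
            · exact hv
            · have := hmono c j hclt hj hlt'
              omega)
      by_cases hc0 : c = 0
      · have hc2 : ((c : Int) - 1 = -1 ∨
            PySem.List.pyGetD A ((PySem.List.pyGet? l ((c : Int) - 1)).getD 0) 0 ≠ 1 ∨
            v ≤ (PySem.List.pyGet? l ((c : Int) - 1)).getD 0) := Or.inl (by rw [hc0]; norm_num)
        rw [if_pos hc2, hm, hc0, List.take_zero]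
        simp
      · have hcast : (c : Int) - 1 = ((c - 1 : Nat) : Int) := by omega
        have hget' : PySem.List.pyGet? l ((c - 1 : Nat) : Int) = some l[c - 1] := by
          rw [PySem.List.pyGet?_natCast]; exact List.getElem?_eq_getElem (by omega)
        have hval : l[c - 1] < v - 1 := hlt (c - 1) (by omega) (by omega)
        rw [hcast, hget']
        simp only [Option.getD_some]
        rw [if_neg (by push Not; exact ⟨by omega, h1 _ (l.getElem_mem _), by omega⟩)]
        rw [hm, getLast?_take_eq l c (Nat.pos_of_ne_zero hc0) (le_of_lt hclt)]
    · push Not at hv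
      have hc1 : ¬((c : Int) = (l.length : Int) ∨ v ≤ (PySem.List.pyGet? l (c : Int)).getD 0) := by
        push Not
        exact ⟨fun h => hcl (by exact_mod_cast h), by rw [hget]; simpa using hv⟩
      rw [if_neg hc1, hget]
      simp only [Option.getD_some]
      rw [if_neg (by push Not; exact ⟨by omega, h1 _ (l.getElem_mem _), by omega⟩)]
      have hm : l.filter (fun x => decide (x < v)) = l.take (c + 1) :=
        filter_lt_eq_take l v (c + 1) hclt
          (fun j hj hjc => by
            rcases Nat.lt_succ_iff_lt_or_eq.mp hjc with h' | rfl
            · have := hlt j hj h'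
              omega
            · exact hv)
          (fun j hj hjc => by
            have hvc : v - 1 ≤ l[c] := hge c hclt (le_refl _)
            have := hmono c j hclt hj (by omega)
            omega)
      rw [hm, getLast?_take_eq l (c + 1) (by omega) hclt]
      simp

theorem rightOf_char (A l : List Int) (v : Int) (hs : l.Pairwise (· < ·))
    (h2 : ∀ x ∈ l, PySem.List.pyGetD A x 0 = 2) :
    rightOf A l v = (l.filter (fun x => decide (v < x))).head? := by
  have hmono := List.pairwise_iff_getElem.mp hs
  obtain ⟨hcle, hlt, hge⟩ := PySem.List.bisectLeft_spec l (v + 1) (hs.imp (fun h => le_of_lt h))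
  set c := PySem.List.bisectLeft l (v + 1) with hcdef
  unfold rightOf
  rw [← hcdef]
  dsimp only []
  by_cases hcl : c = l.length
  · have hc1 : (c : Int) = (l.length : Int) := by exact_mod_cast hcl
    rw [if_pos hc1, if_pos (Or.inl rfl)]
    have hfil : l.filter (fun x => decide (v < x)) = l.drop l.length :=
      filter_gt_eq_drop l v l.length (le_refl _)
        (fun j hj _ => by have := hlt j hj (by omega); omega)
        (fun j hj h => by omega)
    rw [hfil, List.drop_length]
    rfl
  · have hclt : c < l.length := lt_of_le_of_ne hcle hcl
    have hc1 : ¬((c : Int) = (l.length : Int)) := fun h => hcl (by exact_mod_cast h)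
    rw [if_neg hc1]
    have hget : PySem.List.pyGet? l (c : Int) = some l[c] := by
      rw [PySem.List.pyGet?_natCast]; exact List.getElem?_eq_getElem hclt
    rw [hget]
    simp only [Option.getD_some]
    have hcv : v + 1 ≤ l[c] := hge c hclt (le_refl _)
    rw [if_neg (by push Not; exact ⟨by omega, h2 _ (l.getElem_mem _), by omega⟩)]
    have hfil : l.filter (fun x => decide (v < x)) = l.drop c :=
      filter_gt_eq_drop l v c (le_of_lt hclt)
        (fun j hj hjc => by have := hlt j hj hjc; omega)
        (fun j hj hjc => by
          rcases eq_or_lt_of_le hjc with rfl | h'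
          · omega
          · have := hmono c j hclt hj h'
            omega)
    rw [hfil, List.head?_drop]
    exact (List.getElem?_eq_getElem hclt).symm

theorem goL_length (A : List Int) (i last : Int) : (goL A i last).length = A.length := by
  induction A generalizing i last with
  | nil => rfl
  | cons a rest ih => simp [goL, ih]

theorem goL_get (A : List Int) (i last : Int) (k : Nat) (hk : k ≤ A.length) :
    (last :: goL A i last)[k]? =
      some (((idxs 1 A i).filter (fun x => decide (x < i + (k : Int)))).getLast?.getD last) := by
  induction A generalizing i last k with
  | nil =>
    have hk0 : k = 0 := by simpa using hk
    subst hk0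
    simp [goL, idxs]
  | cons a rest ih =>
    match k with
    | 0 =>
      have hf : (idxs 1 (a :: rest) i).filter (fun x => decide (x < i + ((0 : Nat) : Int))) = [] := by
        rw [List.filter_eq_nil_iff]
        intro x hx
        have := idxs_ge 1 (a :: rest) i x hx
        simp; omega
      rw [List.getElem?_cons_zero, hf]
      rfl
    | k + 1 =>
      have hk' : k ≤ rest.length := by simpa using hk
      have harith : i + ((k + 1 : Nat) : Int) = (i + 1) + (k : Int) := by push_cast; ring
      by_cases h : a = 1
      · have lhs : (last :: goL (a :: rest) i last)[k + 1]? = (i :: goL rest (i + 1) i)[k]? := by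
          simp [goL, h]
        rw [lhs, ih (i + 1) i k hk']
        have hidx : idxs 1 (a :: rest) i = i :: idxs 1 rest (i + 1) := by simp [idxs, h]
        rw [hidx, List.filter_cons_of_pos (by simp), List.getLast?_cons]
        simp only [harith, Option.getD_some]
      · have lhs : (last :: goL (a :: rest) i last)[k + 1]? = (last :: goL rest (i + 1) last)[k]? := by
          simp [goL, h]
        rw [lhs, ih (i + 1) last k hk']
        have hidx : idxs 1 (a :: rest) i = idxs 1 rest (i + 1) := by simp [idxs, h]
        rw [hidx]
        simp only [harith]

theorem goR_get (A : List Int) (i : Int) (k : Nat) (hk : k ≤ A.length) :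
    (goR A i)[k]? =
      some (((idxs 2 A i).filter (fun x => decide (i + (k : Int) ≤ x))).head?.getD (i + (A.length : Int))) := by
  induction A generalizing i k with
  | nil =>
    have hk0 : k = 0 := by simpa using hk
    subst hk0
    simp [goR, idxs]
  | cons a rest ih =>
    have hsent : i + ((a :: rest).length : Int) = (i + 1) + (rest.length : Int) := by
      simp only [List.length_cons]; push_cast; ring
    match k with
    | 0 =>
      by_cases h : a = 2
      · have hidx : idxs 2 (a :: rest) i = i :: idxs 2 rest (i + 1) := by simp [idxs, h]
        have lhs : (goR (a :: rest) i)[0]? = some i := by simp [goR, h]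
        rw [lhs, hidx, List.filter_cons_of_pos (by simp)]
        simp
      · have hidx : idxs 2 (a :: rest) i = idxs 2 rest (i + 1) := by simp [idxs, h]
        have lhs : (goR (a :: rest) i)[0]? = some ((goR rest (i + 1)).headD 0) := by simp [goR, h]
        rw [lhs, hidx]
        rw [List.headD_eq_head?_getD, List.head?_eq_getElem?, ih (i + 1) 0 (Nat.zero_le _)]
        have hcong : (idxs 2 rest (i + 1)).filter (fun x => decide ((i + 1) + ((0 : Nat) : Int) ≤ x)) =
            (idxs 2 rest (i + 1)).filter (fun x => decide (i + ((0 : Nat) : Int) ≤ x)) := by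
          apply List.filter_congr
          intro x hx
          have := idxs_ge 2 rest (i + 1) x hx
          simp; omega
        rw [hcong, hsent]
        simp
    | k + 1 =>
      have hk' : k ≤ rest.length := by simpa using hk
      have harith : i + ((k + 1 : Nat) : Int) = (i + 1) + (k : Int) := by push_cast; ring
      have lhs : (goR (a :: rest) i)[k + 1]? = (goR rest (i + 1))[k]? := by simp [goR]
      rw [lhs, ih (i + 1) k hk']
      by_cases h : a = 2
      · have hidx : idxs 2 (a :: rest) i = i :: idxs 2 rest (i + 1) := by simp [idxs, h]
        rw [hidx, List.filter_cons_of_neg (by simp)]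
        rw [hsent]
        simp only [harith]
      · have hidx : idxs 2 (a :: rest) i = idxs 2 rest (i + 1) := by simp [idxs, h]
        rw [hidx, hsent]
        simp only [harith]

theorem mem_idxs_zero (A : List Int) (t w : Int) :
    w ∈ idxs t A 0 ↔ (0 ≤ w ∧ w < (A.length : Int) ∧ PySem.List.pyGetD A w 0 = t) := by
  rw [mem_idxs]
  simp only [zero_add, sub_zero]
  constructor
  · rintro ⟨hw1, hw2, hw3⟩
    obtain ⟨hlt, heq⟩ := List.getElem?_eq_some_iff.mp hw3
    refine ⟨hw1, hw2, ?_⟩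
    rw [PySem.List.pyGetD_eq_getElem A 0 hw1 (by omega), heq]
  · rintro ⟨hw1, hw2, hw3⟩
    have hlt : w.toNat < A.length := by omega
    refine ⟨hw1, hw2, ?_⟩
    rw [List.getElem?_eq_getElem hlt]
    rw [PySem.List.pyGetD_eq_getElem A 0 hw1 (by omega)] at hw3
    rw [hw3]

theorem perQuery (A : List Int) (v : Int) :
    findMinDist A (idxs 1 A 0) (idxs 2 A 0) (PySem.Set.ofList (idxs 1 A 0)) (PySem.Set.ofList (idxs 2 A 0)) v =
      queryB A (A.length : Int) (-1 :: goL A 0 (-1)) (goR A 0) v := by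
  have hb1 : ∀ x ∈ idxs 1 A 0, 0 ≤ x ∧ x < (A.length : Int) :=
    fun x hx => ⟨((mem_idxs_zero A 1 x).mp hx).1, ((mem_idxs_zero A 1 x).mp hx).2.1⟩
  have hb2 : ∀ x ∈ idxs 2 A 0, 0 ≤ x ∧ x < (A.length : Int) :=
    fun x hx => ⟨((mem_idxs_zero A 2 x).mp hx).1, ((mem_idxs_zero A 2 x).mp hx).2.1⟩
  have h1 : ∀ x ∈ idxs 1 A 0, PySem.List.pyGetD A x 0 = 1 :=
    fun x hx => ((mem_idxs_zero A 1 x).mp hx).2.2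
  have h2 : ∀ x ∈ idxs 2 A 0, PySem.List.pyGetD A x 0 = 2 :=
    fun x hx => ((mem_idxs_zero A 2 x).mp hx).2.2
  have hcond : (v = 0 ∨ PySem.Set.contains (PySem.Set.ofList (idxs 1 A 0)) v = true ∨
        PySem.Set.contains (PySem.Set.ofList (idxs 2 A 0)) v = true) ↔
      (v = 0 ∨ (0 ≤ v ∧ v < (A.length : Int) ∧
        (PySem.List.pyGetD A v 0 = 1 ∨ PySem.List.pyGetD A v 0 = 2))) := by
    simp only [PySem.Set.contains_iff, PySem.Set.mem_ofList, mem_idxs_zero]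
    tauto
  unfold findMinDist queryB
  dsimp only []
  by_cases hz : v = 0 ∨ (0 ≤ v ∧ v < (A.length : Int) ∧
      (PySem.List.pyGetD A v 0 = 1 ∨ PySem.List.pyGetD A v 0 = 2))
  · rw [if_pos (hcond.mpr hz), if_pos hz]
  · rw [if_neg (fun h => hz (hcond.mp h)), if_neg hz]
    rw [leftOf_char A (idxs 1 A 0) v (pairwise_idxs 1 A 0) h1,
        rightOf_char A (idxs 2 A 0) v (pairwise_idxs 2 A 0) h2]
    -- the two precomputed lookups agree with the characterisations
    have hlv : (if v ≤ 0 then (-1 : Int) else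
        PySem.List.pyGetD (-1 :: goL A 0 (-1)) (if v < (A.length : Int) then v else (A.length : Int)) 0) =
        ((idxs 1 A 0).filter (fun x => decide (x < v))).getLast?.getD (-1) := by
      by_cases hv0 : v ≤ 0
      · rw [if_pos hv0]
        have hfil : (idxs 1 A 0).filter (fun x => decide (x < v)) = [] := by
          rw [List.filter_eq_nil_iff]
          intro x hx
          have := hb1 x hx
          simp
          omega
        rw [hfil]
        rfl
      · rw [if_neg hv0]
        set k : Int := if v < (A.length : Int) then v else (A.length : Int) with hkdef
        have hk0 : 0 ≤ k ∧ k ≤ (A.length : Int) := by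
          rw [hkdef]; split <;> omega
        have hkcast : k = ((k.toNat : Nat) : Int) := by omega
        have hklen : k.toNat ≤ A.length := by omega
        have hgl := goL_get A 0 (-1) k.toNat hklen
        have hlen : k.toNat < (-1 :: goL A 0 (-1)).length := by
          simp [goL_length]; omega
        rw [hkcast, PySem.List.pyGetD_natCast, List.getD_eq_getElem?_getD, hgl]
        simp only [zero_add, Option.getD_some]
        have hfc : (idxs 1 A 0).filter (fun x => decide (x < (k.toNat : Int))) =
            (idxs 1 A 0).filter (fun x => decide (x < v)) := by
          apply List.filter_congr
          intro x hx
          have := hb1 x hx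
          simp only [decide_eq_decide]
          rw [hkdef] at hkcast ⊢
          split at hkcast <;> omega
        rw [hfc]
    have hrv : (if (A.length : Int) - 1 ≤ v then (A.length : Int) else
        PySem.List.pyGetD (goR A 0) (if 0 < v + 1 then v + 1 else 0) 0) =
        ((idxs 2 A 0).filter (fun x => decide (v < x))).head?.getD (A.length : Int) := by
      by_cases hvn : (A.length : Int) - 1 ≤ v
      · rw [if_pos hvn]
        have hfil : (idxs 2 A 0).filter (fun x => decide (v < x)) = [] := by
          rw [List.filter_eq_nil_iff]
          intro x hx
          have := hb2 x hx
          simp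
          omega
        rw [hfil]
        rfl
      · rw [if_neg hvn]
        set k : Int := if 0 < v + 1 then v + 1 else 0 with hkdef
        have hk0 : 0 ≤ k ∧ k ≤ (A.length : Int) := by
          rw [hkdef]; split <;> omega
        have hkcast : k = ((k.toNat : Nat) : Int) := by omega
        have hklen : k.toNat ≤ A.length := by omega
        have hgr := goR_get A 0 k.toNat hklen
        rw [hkcast, PySem.List.pyGetD_natCast, List.getD_eq_getElem?_getD, hgr]
        simp only [zero_add, Option.getD_some]
        have hfc : (idxs 2 A 0).filter (fun x => decide ((k.toNat : Int) ≤ x)) =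
            (idxs 2 A 0).filter (fun x => decide (v < x)) := by
          apply List.filter_congr
          intro x hx
          have := hb2 x hx
          simp only [decide_eq_decide]
          rw [hkdef] at hkcast ⊢
          split at hkcast <;> omega
        rw [hfc]
    rw [hlv, hrv]
    rcases holo : ((idxs 1 A 0).filter (fun x => decide (x < v))).getLast? with _ | x
    · rcases horo : ((idxs 2 A 0).filter (fun x => decide (v < x))).head? with _ | r
      · simp
      · have hrmem := List.mem_filter.mp (List.mem_of_mem_head? horo)
        have hrb := hb2 r hrmem.1
        have hrv' : v < r := by simpa using hrmem.2
        rw [Option.getD_none, Option.getD_some]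
        rw [if_neg (fun h => by omega), if_pos rfl]
        simp only []
        rw [abs_of_pos (by omega)]
    · have hxmem := List.mem_filter.mp (List.mem_of_getLast? holo)
      have hxb := hb1 x hxmem.1
      have hxv : x < v := by simpa using hxmem.2
      rcases horo : ((idxs 2 A 0).filter (fun x => decide (v < x))).head? with _ | r
      · rw [Option.getD_some, Option.getD_none]
        rw [if_neg (fun h => by omega), if_neg (by omega), if_pos rfl]
        simp only []
        rw [abs_of_pos (by omega)]
      · have hrmem := List.mem_filter.mp (List.mem_of_mem_head? horo)
        have hrb := hb2 r hrmem.1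
        have hrv' : v < r := by simpa using hrmem.2
        rw [Option.getD_some, Option.getD_some]
        rw [if_neg (fun h => by omega), if_neg (by omega), if_neg (by omega)]
        simp only []
        rw [abs_of_pos (by omega), abs_of_pos (by omega)]

-- ===== VERDICT (by name: the statement is the Claim_ definition above) =====
theorem solve_spec : Claim_equal_solve := by
  intro A B _
  unfold Spec_solve solve solve_alt
  dsimp only []
  rw [idxs_eq_enum 1 A 0, idxs_eq_enum 2 A 0]
  have : ∀ b ∈ B, PySem.Int.toStr (findMinDist A (idxs 1 A 0) (idxs 2 A 0)
      (PySem.Set.ofList (idxs 1 A 0)) (PySem.Set.ofList (idxs 2 A 0)) (b - 1)) =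
      PySem.Int.toStr (queryB A (A.length : Int) (-1 :: goL A 0 (-1)) (goR A 0) (b - 1)) := by
    intro b _; rw [perQuery]
  rw [List.map_congr_left this]
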